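-- pv_equiv track=rewrite | github.com/ilyas-djenidi/cybrain | web_app/ai_agent.py | _build_attack_chain
-- ===== SOURCE A (Python) =====
-- def _build_attack_chain(findings):
--     """Build realistic attack scenario."""
--     sevs = [
--         f.get("severity", "INFO")
--         for f in findings
--     ]
--
--     if "CRITICAL" in sevs:
--         return (
--             "A sophisticated attacker would:\n\n"
--             "1. **Reconnaissance** — Scan target "
--             "ports and identify technology stack\n"
--             "2. **Initial Access** — Exploit "
--             "CRITICAL vulnerability for first "
--             "foothold\n"
--             "3. **Credential Theft** — Use "
--             "injection vulnerabilities to extract "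
--             "database credentials\n"
--             "4. **Lateral Movement** — Use stolen "
--             "credentials to access other systems\n"
--             "5. **Data Exfiltration** — Extract "
--             "sensitive data over encrypted channel\n\n"
--             "**Time to compromise:** "
--             "Potentially under 30 minutes"
--         )
--     elif "HIGH" in sevs:
--         return (
--             "An attacker would:\n\n"
--             "1. **Scan** — Identify HIGH severity "
--             "misconfigurations\n"
--             "2. **Exploit** — Use exposed services "
--             "or missing security controls\n"
--             "3. **Persist** — Establish backdoor "
--             "via insecure upload or config\n\n"
--             "**Time to compromise:** "
--             "Hours to days depending on skill"
--         )
--     else: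
--         return (
--             "Low-to-medium severity findings "
--             "typically require additional "
--             "vulnerabilities to chain together "
--             "for significant impact.\n\n"
--             "Maintain regular security reviews "
--             "to prevent escalation."
--         )
-- ===== SOURCE B (Python) =====
-- _PRIORITY = {"CRITICAL": 2, "HIGH": 1}
--
-- _TEXTS = {
--     2: (
--         "A sophisticated attacker would:\n\n"
--         "1. **Reconnaissance** — Scan target "
--         "ports and identify technology stack\n"
--         "2. **Initial Access** — Exploit "
--         "CRITICAL vulnerability for first "
--         "foothold\n"
--         "3. **Credential Theft** — Use "
--         "injection vulnerabilities to extract "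
--         "database credentials\n"
--         "4. **Lateral Movement** — Use stolen "
--         "credentials to access other systems\n"
--         "5. **Data Exfiltration** — Extract "
--         "sensitive data over encrypted channel\n\n"
--         "**Time to compromise:** "
--         "Potentially under 30 minutes"
--     ),
--     1: (
--         "An attacker would:\n\n"
--         "1. **Scan** — Identify HIGH severity "
--         "misconfigurations\n"
--         "2. **Exploit** — Use exposed services "
--         "or missing security controls\n"
--         "3. **Persist** — Establish backdoor "
--         "via insecure upload or config\n\n"
--         "**Time to compromise:** "
--         "Hours to days depending on skill"
--     ),
--     0: (
--         "Low-to-medium severity findings "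
--         "typically require additional "
--         "vulnerabilities to chain together "
--         "for significant impact.\n\n"
--         "Maintain regular security reviews "
--         "to prevent escalation."
--     ),
-- }
--
--
-- def _build_attack_chain(findings):
--     """Build realistic attack scenario (rank-table variant)."""
--     rank = max(
--         (_PRIORITY.get(f.get("severity", "INFO"), 0) for f in findings),
--         default=0,
--     )
--     return _TEXTS[rank]
-- ===== Notes on version B (the rewrite author's own statement) =====
-- stated objective: alternative
-- what changed: Replaces the two separate membership scans over the severity list with a single pass computing the maximum of a severity-priority table, then indexing the response text by that rank.
import Mathlib
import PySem

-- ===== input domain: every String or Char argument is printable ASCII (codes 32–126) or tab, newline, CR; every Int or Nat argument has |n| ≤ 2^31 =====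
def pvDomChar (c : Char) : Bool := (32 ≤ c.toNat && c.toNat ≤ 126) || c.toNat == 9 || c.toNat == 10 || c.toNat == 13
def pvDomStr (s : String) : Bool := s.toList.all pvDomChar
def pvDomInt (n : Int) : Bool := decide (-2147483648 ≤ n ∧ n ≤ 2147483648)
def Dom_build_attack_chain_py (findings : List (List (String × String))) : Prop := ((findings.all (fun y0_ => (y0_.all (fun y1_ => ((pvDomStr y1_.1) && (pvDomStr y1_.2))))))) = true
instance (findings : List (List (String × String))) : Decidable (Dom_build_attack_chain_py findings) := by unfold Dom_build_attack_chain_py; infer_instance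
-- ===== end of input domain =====

-- B replaces A's two membership scans over the severity list by one pass taking the
-- maximum of a severity→priority table and indexing the text by that rank (objective: alternative).

def pvTextCritical : String :=
  "A sophisticated attacker would:\n\n1. **Reconnaissance** — Scan target ports and identify technology stack\n2. **Initial Access** — Exploit CRITICAL vulnerability for first foothold\n3. **Credential Theft** — Use injection vulnerabilities to extract database credentials\n4. **Lateral Movement** — Use stolen credentials to access other systems\n5. **Data Exfiltration** — Extract sensitive data over encrypted channel\n\n**Time to compromise:** Potentially under 30 minutes"

def pvTextHigh : String :=
  "An attacker would:\n\n1. **Scan** — Identify HIGH severity misconfigurations\n2. **Exploit** — Use exposed services or missing security controls\n3. **Persist** — Establish backdoor via insecure upload or config\n\n**Time to compromise:** Hours to days depending on skill"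

def pvTextLow : String :=
  "Low-to-medium severity findings typically require additional vulnerabilities to chain together for significant impact.\n\nMaintain regular security reviews to prevent escalation."

-- ===== PORT A =====
def build_attack_chain_py (findings : List (List (String × String))) : String :=
  let sevs := findings.map (fun f => (PySem.Dict.mk f).getD "severity" "INFO")
  if sevs.contains "CRITICAL" then pvTextCritical
  else if sevs.contains "HIGH" then pvTextHigh
  else pvTextLow

-- ===== PORT B =====
def pvPriority (s : String) : Int :=
  (PySem.Dict.mk [("CRITICAL", (2 : Int)), ("HIGH", 1)]).getD s 0

def pvStep (m : Int) (f : List (String × String)) : Int :=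
  max m (pvPriority ((PySem.Dict.mk f).getD "severity" "INFO"))

def build_attack_chain_py_alt (findings : List (List (String × String))) : String :=
  let rank := findings.foldl pvStep 0
  if rank = 2 then pvTextCritical
  else if rank = 1 then pvTextHigh
  else pvTextLow

-- ===== PRECONDITION & SPEC =====
def Spec_build_attack_chain_py (findings : List (List (String × String))) (out : String) : Prop := out = build_attack_chain_py_alt findings
instance (findings : List (List (String × String))) (out : String) : Decidable (Spec_build_attack_chain_py findings out) := by unfold Spec_build_attack_chain_py; infer_instance

-- ===== CLAIM (what is proved, stated in full; the proofs are below) =====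
def Claim_equal_build_attack_chain_py : Prop := ∀ (findings : List (List (String × String))), Dom_build_attack_chain_py findings → Spec_build_attack_chain_py findings (build_attack_chain_py findings)

-- ===== LEMMAS AND PROOFS =====

theorem pvPriority_eq (s : String) :
    pvPriority s = if s = "CRITICAL" then 2 else if s = "HIGH" then 1 else 0 := by
  by_cases h1 : s = "CRITICAL"
  · subst h1; decide
  · by_cases h2 : s = "HIGH"
    · subst h2; decide
    · have b1 : (("CRITICAL" : String) == s) = false := beq_eq_false_iff_ne.mpr (Ne.symm h1)
      have b2 : (("HIGH" : String) == s) = false := beq_eq_false_iff_ne.mpr (Ne.symm h2)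
      simp [pvPriority, PySem.Dict.getD, PySem.Dict.get?, b1, b2, h1, h2]

theorem pvStep_nonneg (m : Int) (f : List (String × String)) (hm : 0 ≤ m) : 0 ≤ pvStep m f := by
  simp only [pvStep]; omega

theorem pvFoldl_shift (fs : List (List (String × String))) (m : Int) (hm : 0 ≤ m) :
    fs.foldl pvStep m = max m (fs.foldl pvStep 0) := by
  induction fs generalizing m with
  | nil => simp; omega
  | cons f fs ih =>
    simp only [List.foldl_cons]
    rw [ih (pvStep m f) (pvStep_nonneg m f hm),
        ih (pvStep 0 f) (pvStep_nonneg 0 f le_rfl)]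
    simp only [pvStep]
    omega

theorem pvRank_char (fs : List (List (String × String))) :
    fs.foldl pvStep 0 =
      (if (fs.map (fun f => (PySem.Dict.mk f).getD "severity" "INFO")).contains "CRITICAL" then 2
       else if (fs.map (fun f => (PySem.Dict.mk f).getD "severity" "INFO")).contains "HIGH" then 1
       else 0) := by
  induction fs with
  | nil => simp
  | cons f fs ih =>
    simp only [List.foldl_cons, List.map_cons, List.contains_cons, Bool.or_eq_true, beq_iff_eq]
    rw [pvFoldl_shift fs (pvStep 0 f) (pvStep_nonneg 0 f le_rfl), ih]
    simp only [pvStep, pvPriority_eq]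
    by_cases h1 : (PySem.Dict.mk f).getD "severity" "INFO" = "CRITICAL"
    · simp [h1]
      split_ifs <;> omega
    · have e1 : ("CRITICAL" = (PySem.Dict.mk f).getD "severity" "INFO") = False :=
        eq_false fun h => h1 h.symm
      by_cases h2 : (PySem.Dict.mk f).getD "severity" "INFO" = "HIGH"
      · simp [h2]
        split_ifs <;> omega
      · have e2 : ("HIGH" = (PySem.Dict.mk f).getD "severity" "INFO") = False :=
          eq_false fun h => h2 h.symm
        simp [e1, e2, h1, h2]
        split_ifs <;> omega

-- ===== VERDICT (by name: the statement is the Claim_ definition above) =====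
theorem build_attack_chain_py_spec : Claim_equal_build_attack_chain_py := by
  intro findings _
  unfold Spec_build_attack_chain_py build_attack_chain_py build_attack_chain_py_alt
  dsimp only
  rw [pvRank_char]
  split_ifs <;> first | rfl | omega
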